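-- pv_equiv track=rewrite | github.com/Koltanuk/DI_Bootcamp | Week29Complexity/day2/exgold.py | duplicates_count
-- ===== SOURCE A (Python) =====
-- def duplicates_count(numbers: list) -> int:
--     seen = set()
--     duplicates = set()
--
--     for num in numbers:
--         if num in seen:
--             duplicates.add(num)
--         else:
--             seen.add(num)
--
--     return len(duplicates)
-- ===== SOURCE B (Python) =====
-- def duplicates_count(numbers: list) -> int:
--     # Phase 1: build a full frequency table.
--     counts = {}
--     for num in numbers:
--         counts[num] = counts.get(num, 0) + 1
--     # Phase 2: count how many distinct values occur more than once.
--     result = 0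
--     for c in counts.values():
--         if c > 1:
--             result += 1
--     return result
-- ===== Notes on version B (the rewrite author's own statement) =====
-- stated objective: idiomatic
-- what changed: B replaces A's single streaming pass maintaining two sets with a per-element seen/duplicate branch by two phases: build a frequency table of all elements, then a separate scan counting table values exceeding 1.
import Mathlib
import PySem

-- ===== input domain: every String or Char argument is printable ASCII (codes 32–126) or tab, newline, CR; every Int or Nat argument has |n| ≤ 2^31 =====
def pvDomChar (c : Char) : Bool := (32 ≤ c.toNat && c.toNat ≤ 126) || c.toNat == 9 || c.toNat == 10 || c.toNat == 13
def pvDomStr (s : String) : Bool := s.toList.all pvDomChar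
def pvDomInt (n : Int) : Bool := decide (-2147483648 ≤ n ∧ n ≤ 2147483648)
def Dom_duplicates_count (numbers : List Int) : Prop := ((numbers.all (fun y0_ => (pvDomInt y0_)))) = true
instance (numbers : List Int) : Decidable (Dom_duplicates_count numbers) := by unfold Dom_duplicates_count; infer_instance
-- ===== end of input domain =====

-- B builds a frequency table in one pass, then counts table values > 1 in a second pass,
-- replacing A's single streaming pass over two sets; same cost, more idiomatic decomposition.


-- ===== PORT A =====
-- one pass; state = (seen, duplicates); per element: already seen → add to duplicates, else to seen
def duplicates_count (numbers : List Int) : Int :=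
  PySem.Set.len
    (numbers.foldl
      (fun (st : PySem.Set Int × PySem.Set Int) num =>
        if PySem.Set.contains st.1 num then (st.1, PySem.Set.add st.2 num)
        else (PySem.Set.add st.1 num, st.2))
      (PySem.Set.empty, PySem.Set.empty)).2

-- ===== PORT B =====
-- phase 1: counts[num] = counts.get(num, 0) + 1 over all elements; phase 2: count values > 1
def duplicates_count_alt (numbers : List Int) : Int :=
  (numbers.foldl
      (fun (d : PySem.Dict Int Int) num => d.insert num (d.getD num 0 + 1))
      PySem.Dict.empty).values.foldl
    (fun result c => if c > 1 then result + 1 else result) 0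

-- ===== PRECONDITION & SPEC =====
def Spec_duplicates_count (numbers : List Int) (out : Int) : Prop := out = duplicates_count_alt numbers
instance (numbers : List Int) (out : Int) : Decidable (Spec_duplicates_count numbers out) := by unfold Spec_duplicates_count; infer_instance

-- ===== CLAIM (what is proved, stated in full; the proofs are below) =====
def Claim_equal_duplicates_count : Prop := ∀ (numbers : List Int), Dom_duplicates_count numbers → Spec_duplicates_count numbers (duplicates_count numbers)

-- ===== LEMMAS AND PROOFS =====

-- Invariant of A's loop: the duplicates set stays nodup, and its final membership is
-- "already a duplicate, or seen before and occurring in the rest, or occurring ≥ 2 times in the rest".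
theorem dupA_inv (l : List Int) (s d : PySem.Set Int) (hs : s.Nodup) (hd : d.Nodup) :
    (l.foldl
      (fun (st : PySem.Set Int × PySem.Set Int) num =>
        if PySem.Set.contains st.1 num then (st.1, PySem.Set.add st.2 num)
        else (PySem.Set.add st.1 num, st.2)) (s, d)).2.Nodup ∧
    (∀ x, x ∈ (l.foldl
      (fun (st : PySem.Set Int × PySem.Set Int) num =>
        if PySem.Set.contains st.1 num then (st.1, PySem.Set.add st.2 num)
        else (PySem.Set.add st.1 num, st.2)) (s, d)).2 ↔
      x ∈ d ∨ (x ∈ s ∧ x ∈ l) ∨ 2 ≤ l.count x) := by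
  induction l generalizing s d with
  | nil => simp [hd]
  | cons num tl ih =>
    simp only [List.foldl_cons]
    by_cases hmem : num ∈ s
    · rw [if_pos (by simpa [PySem.Set.contains_iff] using hmem)]
      obtain ⟨h1, h2⟩ := ih s (PySem.Set.add d num) hs (PySem.Set.nodup_add d num hd)
      refine ⟨h1, fun x => ?_⟩
      rw [h2 x]
      simp only [PySem.Set.mem_add, List.mem_cons, List.count_cons]
      by_cases hx : x = num
      · subst hx; simp [hmem]
      · simp [hx, Ne.symm hx]
    · rw [if_neg (by simpa [PySem.Set.contains_iff] using hmem)]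
      obtain ⟨h1, h2⟩ := ih (PySem.Set.add s num) d (PySem.Set.nodup_add s num hs) hd
      refine ⟨h1, fun x => ?_⟩
      rw [h2 x]
      simp only [PySem.Set.mem_add, List.mem_cons, List.count_cons]
      by_cases hx : x = num
      · subst hx
        have h1c : x ∈ tl ↔ 1 ≤ tl.count x := List.one_le_count_iff.symm
        by_cases hxd : x ∈ d
        · simp [hxd, hmem]
        · simp only [hxd, hmem, false_and, false_or, or_true, true_and,
            beq_self_eq_true, if_true, h1c]
          omega
      · simp [hx, Ne.symm hx]

-- A's result counts the nodup list of values occurring ≥ 2 times; B's filtered table has the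
-- same members and is nodup too, so the two lists are a permutation and the lengths agree.
theorem duplicates_count_spec' (numbers : List Int) :
    duplicates_count numbers = duplicates_count_alt numbers := by
  unfold duplicates_count duplicates_count_alt
  rw [PySem.Dict.foldl_insert_getD_add_one_eq_counter]
  obtain ⟨hnd, hmem⟩ := dupA_inv numbers PySem.Set.empty PySem.Set.empty (by simp [PySem.Set.empty]) (by simp [PySem.Set.empty])
  simp only [PySem.Set.empty, List.not_mem_nil, false_and, false_or] at hnd hmem
  -- B side: values of the counter are the counts of the distinct elements
  have hvals : (PySem.Dict.counter numbers).values
      = (PySem.Set.ofList numbers).map (fun k => (numbers.count k : Int)) := by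
    show (PySem.Dict.counter numbers).items.map (·.2) = _
    rw [PySem.Dict.items_counter]
    simp
  rw [hvals, List.foldl_map]
  have hfc := PySem.List.foldl_count_if
    (fun k : Int => decide ((numbers.count k : Int) > 1)) (PySem.Set.ofList numbers) 0
  simp only [decide_eq_true_eq] at hfc
  rw [hfc, zero_add]
  -- both sides are lengths of nodup lists with the same membership
  have hperm : ((PySem.Set.ofList numbers).filter
      (fun k => decide ((numbers.count k : Int) > 1))).Perm
      (numbers.foldl
        (fun (st : PySem.Set Int × PySem.Set Int) num =>
          if PySem.Set.contains st.1 num then (st.1, PySem.Set.add st.2 num)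
          else (PySem.Set.add st.1 num, st.2)) ([], [])).2 := by
    rw [List.perm_ext_iff_of_nodup (List.Nodup.filter _ (PySem.Set.nodup_ofList numbers)) hnd]
    intro x
    rw [hmem x]
    simp only [List.mem_filter, PySem.Set.mem_ofList, decide_eq_true_eq]
    constructor
    · rintro ⟨-, h⟩; omega
    · intro h
      have hx : x ∈ numbers := by
        rw [← List.count_pos_iff]; omega
      exact ⟨hx, by exact_mod_cast (by omega : (2:Int) ≤ (numbers.count x : Int))⟩
  have hlen := hperm.length_eq
  rw [List.countP_eq_length_filter]
  simp only [PySem.Set.len, PySem.Set.empty]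
  exact_mod_cast hlen.symm

-- ===== VERDICT (by name: the statement is the Claim_ definition above) =====
theorem duplicates_count_spec : Claim_equal_duplicates_count := by
  intro numbers _
  exact duplicates_count_spec' numbers
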